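-- pv_equiv track=rewrite | github.com/FahmidMorshed/FLASH-SVM-StackOverflow | support.py | get_IFA_score
-- ===== SOURCE A (Python) =====
-- def get_IFA_score(actual, predicted):
--     """
--     get Initial False Alarm score
--     :param actual: list of values
--     :param predicted: ndarray of values
--     :return: all_k: Panda DataFrame value of all IFA for each class
--     """
--     all_k_dict = []
--     for cls in range(1, 5):
--         k = 0
--         for i, pred_cls in enumerate(predicted):
--             if str(pred_cls) == str(cls):
--                 k += 1
--                 if str(actual[i]) == str(cls):
--                     all_k_dict.append(k)
--                     break;
--     return all_k_dict
-- ===== SOURCE B (Python) =====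
-- def get_IFA_score(actual, predicted):
--     # Single pass over predicted: per-class (1..4) occurrence counters and
--     # first-true-positive results, assembled in class order at the end.
--     counts = [0] * 5
--     res = [None] * 5
--     for i, p in enumerate(predicted):
--         if 1 <= p <= 4 and res[p] is None:
--             counts[p] += 1
--             if actual[i] == p:
--                 res[p] = counts[p]
--     return [res[c] for c in range(1, 5) if res[c] is not None]
-- ===== Notes on version B (the rewrite author's own statement) =====
-- stated objective: faster
-- what changed: A scans predicted once per class (four passes, each with an inner count-and-break); B makes a single pass over predicted maintaining per-class counters and first-true-positive results, then assembles the output in class order.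
import Mathlib
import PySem

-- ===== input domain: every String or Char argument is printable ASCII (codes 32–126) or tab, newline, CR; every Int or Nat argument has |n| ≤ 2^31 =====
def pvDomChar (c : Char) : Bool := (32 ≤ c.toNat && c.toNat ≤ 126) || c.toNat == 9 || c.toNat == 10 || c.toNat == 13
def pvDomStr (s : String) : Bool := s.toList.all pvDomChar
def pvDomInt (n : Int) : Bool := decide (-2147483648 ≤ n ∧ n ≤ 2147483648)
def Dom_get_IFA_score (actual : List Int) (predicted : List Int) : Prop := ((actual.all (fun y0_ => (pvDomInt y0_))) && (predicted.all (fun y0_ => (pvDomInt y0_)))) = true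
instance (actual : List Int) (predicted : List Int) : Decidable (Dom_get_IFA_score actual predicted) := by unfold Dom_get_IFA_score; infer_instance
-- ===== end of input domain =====

-- B replaces A's four scans of `predicted` (one per class, with break) by a single pass
-- maintaining per-class counters and first-true-positive results (objective: faster — one pass instead of four, constant factor).

-- ===== PORT A =====
-- inner 'for i, pred_cls in enumerate(predicted): …' loop of A for one class `cls`,
-- with running count k; returns some k' at the break, none if the loop finishes.
-- str(pred_cls) == str(cls) on ints is exactly pred_cls = cls (str is injective on ints).
-- actual[i] raises IndexError out of range (excluded by Pre_); pyGetD's default 0 is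
-- only read outside Pre_ (0 never equals cls ∈ 1..4).
def pvScanA (actual : List Int) (cls : Int) : List (Int × Int) → Int → Option Int
  | [], _ => none
  | (i, p) :: rest, k =>
    if p = cls then
      if PySem.List.pyGetD actual i 0 = cls then some (k + 1)
      else pvScanA actual cls rest (k + 1)
    else pvScanA actual cls rest k

def get_IFA_score (actual : List Int) (predicted : List Int) : List Int :=
  (PySem.List.pyRange 1 5 1).foldl (fun acc cls =>
    match pvScanA actual cls (PySem.List.enumerate predicted) 0 with
    | some k => acc ++ [k]
    | none => acc) []

-- ===== PORT B =====
-- one step of B's single pass: (counts, res) updated at element (i, p).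
-- actual[i] raises IndexError out of range (excluded by Pre_), as in A's port.
def pvStepB (actual : List Int) (st : List Int × List (Option Int)) (ip : Int × Int) :
    List Int × List (Option Int) :=
  if 1 ≤ ip.2 ∧ ip.2 ≤ 4 ∧ st.2.getD ip.2.toNat none = none then
    let counts := st.1.set ip.2.toNat (st.1.getD ip.2.toNat 0 + 1)
    if PySem.List.pyGetD actual ip.1 0 = ip.2 then
      (counts, st.2.set ip.2.toNat (some (counts.getD ip.2.toNat 0)))
    else (counts, st.2)
  else st

def get_IFA_score_alt (actual : List Int) (predicted : List Int) : List Int :=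
  let st := (PySem.List.enumerate predicted).foldl (pvStepB actual)
    ([0, 0, 0, 0, 0], [none, none, none, none, none])
  (PySem.List.pyRange 1 5 1).foldl (fun acc c =>
    match st.2.getD c.toNat none with
    | some v => acc ++ [v]
    | none => acc) []

-- ===== PRECONDITION & SPEC =====
-- Pre_ excludes exactly the inputs where Python A raises IndexError on actual[i]:
-- an index i ≥ len(actual) holding a class-1..4 prediction whose class has no true
-- positive inside actual's range (so the break does not stop the scan before i).
def Pre_get_IFA_score (actual : List Int) (predicted : List Int) : Prop :=
  ∀ i : Nat, i < predicted.length → actual.length ≤ i →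
    1 ≤ predicted.getD i 0 → predicted.getD i 0 ≤ 4 →
    ∃ j, j < actual.length ∧ predicted.getD j 0 = predicted.getD i 0 ∧
      actual.getD j 0 = predicted.getD i 0
instance (actual : List Int) (predicted : List Int) : Decidable (Pre_get_IFA_score actual predicted) := by unfold Pre_get_IFA_score; infer_instance

def pvWitness_get_IFA_score : List Int × List Int := ([1, 2, 3, 4], [1, 2, 3, 4])

def Spec_get_IFA_score (actual : List Int) (predicted : List Int) (out : List Int) : Prop := out = get_IFA_score_alt actual predicted
instance (actual : List Int) (predicted : List Int) (out : List Int) : Decidable (Spec_get_IFA_score actual predicted out) := by unfold Spec_get_IFA_score; infer_instance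

-- ===== CLAIM (what is proved, stated in full; the proofs are below) =====
def Claim_equal_get_IFA_score : Prop := ∀ (actual : List Int) (predicted : List Int), Dom_get_IFA_score actual predicted → Pre_get_IFA_score actual predicted → Spec_get_IFA_score actual predicted (get_IFA_score actual predicted)

-- ===== LEMMAS AND PROOFS =====

-- The slot of class c in B's result list after the pass equals A's scan for c, started
-- from the current counter, unless the slot is already filled (then it stays).
lemma pvLoopB_res (actual : List Int) (L : List (Int × Int)) :
    ∀ (counts : List Int) (res : List (Option Int)),
      counts.length = 5 → res.length = 5 →
      ∀ c : Int, 1 ≤ c → c ≤ 4 →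
      (L.foldl (pvStepB actual) (counts, res)).2.getD c.toNat none =
        match res.getD c.toNat none with
        | some v => some v
        | none => pvScanA actual c L (counts.getD c.toNat 0) := by
  induction L with
  | nil =>
    intro counts res _ _ c _ _
    simp only [List.foldl]
    cases h : res.getD c.toNat none <;> simp [pvScanA]
  | cons ip rest ih =>
    intro counts res hc hr c hc1 hc4
    obtain ⟨i, p⟩ := ip
    simp only [List.foldl, pvStepB]
    by_cases hp : 1 ≤ p ∧ p ≤ 4 ∧ res.getD p.toNat none = none
    · rw [if_pos hp]
      obtain ⟨hp1, hp4, hpnone⟩ := hp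
      have hplt : p.toNat < 5 := by omega
      have hclt : c.toNat < 5 := by omega
      by_cases hpc : p = c
      · subst hpc
        have hcnt : (counts.set p.toNat (counts.getD p.toNat 0 + 1)).getD p.toNat 0 =
            counts.getD p.toNat 0 + 1 := by
          simp [List.getD_eq_getElem?_getD, hc ▸ hplt]
        by_cases hhit : PySem.List.pyGetD actual i 0 = p
        · simp only [if_pos hhit]
          rw [ih _ _ (by simp [hc]) (by simp [hr]) p hp1 hp4]
          have : (res.set p.toNat (some ((counts.set p.toNat (counts.getD p.toNat 0 + 1)).getD p.toNat 0))).getD p.toNat none =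
              some ((counts.set p.toNat (counts.getD p.toNat 0 + 1)).getD p.toNat 0) := by
            simp [List.getD_eq_getElem?_getD, hr ▸ hplt]
          rw [this, hcnt, hpnone]
          simp [pvScanA, hhit]
        · simp only [if_neg hhit]
          rw [ih _ _ (by simp [hc]) hr p hp1 hp4, hpnone, hcnt]
          simp [pvScanA, hhit]
      · -- p ≠ c : class c's slots are untouched by this step
        have hne : p.toNat ≠ c.toNat := by omega
        have hresc : ∀ x, (res.set p.toNat x).getD c.toNat none = res.getD c.toNat none := by
          intro x; simp [List.getD_eq_getElem?_getD, List.getElem?_set_ne hne]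
        have hcntc : (counts.set p.toNat (counts.getD p.toNat 0 + 1)).getD c.toNat 0 =
            counts.getD c.toNat 0 := by
          simp [List.getD_eq_getElem?_getD, List.getElem?_set_ne hne]
        by_cases hhit : PySem.List.pyGetD actual i 0 = p
        · simp only [if_pos hhit]
          rw [ih _ _ (by simp [hc]) (by simp [hr]) c hc1 hc4, hresc, hcntc]
          cases h : res.getD c.toNat none <;> simp [pvScanA, hpc]
        · simp only [if_neg hhit]
          rw [ih _ _ (by simp [hc]) hr c hc1 hc4, hcntc]
          cases h : res.getD c.toNat none <;> simp [pvScanA, hpc]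
    · rw [if_neg hp]
      rw [ih _ _ hc hr c hc1 hc4]
      cases h : res.getD c.toNat none with
      | some v => rfl
      | none =>
        by_cases hpc : p = c
        · subst hpc
          exfalso; exact hp ⟨hc1, hc4, h⟩
        · simp [pvScanA, hpc]

-- ===== VERDICT (by name: the statement is the Claim_ definition above) =====
theorem get_IFA_score_spec : Claim_equal_get_IFA_score := by
  intro actual predicted _ _
  unfold Spec_get_IFA_score get_IFA_score get_IFA_score_alt
  have hrange : PySem.List.pyRange 1 5 1 = [1, 2, 3, 4] := by decide
  have h := pvLoopB_res actual (PySem.List.enumerate predicted)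
    [0, 0, 0, 0, 0] [none, none, none, none, none] rfl rfl
  have h1 : (List.foldl (pvStepB actual) ([0, 0, 0, 0, 0], [none, none, none, none, none])
      (PySem.List.enumerate predicted)).2.getD 1 none =
      pvScanA actual 1 (PySem.List.enumerate predicted) 0 := by simpa using h 1 (by norm_num) (by norm_num)
  have h2 : (List.foldl (pvStepB actual) ([0, 0, 0, 0, 0], [none, none, none, none, none])
      (PySem.List.enumerate predicted)).2.getD 2 none =
      pvScanA actual 2 (PySem.List.enumerate predicted) 0 := by simpa using h 2 (by norm_num) (by norm_num)
  have h3 : (List.foldl (pvStepB actual) ([0, 0, 0, 0, 0], [none, none, none, none, none])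
      (PySem.List.enumerate predicted)).2.getD 3 none =
      pvScanA actual 3 (PySem.List.enumerate predicted) 0 := by simpa using h 3 (by norm_num) (by norm_num)
  have h4 : (List.foldl (pvStepB actual) ([0, 0, 0, 0, 0], [none, none, none, none, none])
      (PySem.List.enumerate predicted)).2.getD 4 none =
      pvScanA actual 4 (PySem.List.enumerate predicted) 0 := by simpa using h 4 (by norm_num) (by norm_num)
  rw [hrange]
  simp only [List.foldl, show Int.toNat 1 = 1 from rfl, show Int.toNat 2 = 2 from rfl,
    show Int.toNat 3 = 3 from rfl, show Int.toNat 4 = 4 from rfl, h1, h2, h3, h4]
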